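-- pv_equiv track=rewrite | github.com/TypAnna/GruProgDD1331 | Övning2/uppg5Checkboard.py | odd_row_string
-- ===== SOURCE A (Python) =====
-- def odd_row_string(size):
--     oddRow = ""
--     for col in range(size):
--         if col % 2 == 0:
--             oddRow += " "
--         else:
--             oddRow += "*"
--     return oddRow
-- ===== SOURCE B (Python) =====
-- def odd_row_string(size):
--     return (" *" * ((size + 1) // 2))[:size]
-- ===== Notes on version B (the rewrite author's own statement) =====
-- stated objective: idiomatic
-- what changed: Replaces the per-character loop with parity branch by a closed-form construction: repeat the two-character unit ' *' (size+1)//2 times and slice to [:size].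
import Mathlib
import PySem

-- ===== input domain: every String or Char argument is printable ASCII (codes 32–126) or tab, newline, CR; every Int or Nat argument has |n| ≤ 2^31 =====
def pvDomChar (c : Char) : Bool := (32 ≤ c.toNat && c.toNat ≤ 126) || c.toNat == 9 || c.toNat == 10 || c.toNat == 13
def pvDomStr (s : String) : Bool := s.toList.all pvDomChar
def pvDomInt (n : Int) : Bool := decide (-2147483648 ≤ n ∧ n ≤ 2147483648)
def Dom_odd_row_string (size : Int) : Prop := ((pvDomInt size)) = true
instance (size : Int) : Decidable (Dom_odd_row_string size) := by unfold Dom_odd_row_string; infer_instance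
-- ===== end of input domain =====

-- B replaces A's per-character loop with the closed form (" *" * ((size+1)//2))[:size] (idiomatic).

-- ===== PORT A =====
-- loop: for col in range(size): append " " if col % 2 == 0 else "*"
def odd_row_string (size : Int) : String :=
  String.ofList ((PySem.List.pyRange 0 size 1).foldl
    (fun acc col => acc ++ (if PySem.Int.mod col 2 = 0 then [' '] else ['*'])) [])

-- ===== PORT B =====
-- (" *" * ((size + 1) // 2))[:size]; Python str*n is empty for n ≤ 0, matched by Int.toNat
def odd_row_string_alt (size : Int) : String :=
  String.ofList (PySem.List.slice
    ((List.replicate (PySem.Int.floordiv (size + 1) 2).toNat [' ', '*']).flatten)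
    none (some size))

-- ===== PRECONDITION & SPEC =====
def Spec_odd_row_string (size : Int) (out : String) : Prop := out = odd_row_string_alt size
instance (size : Int) (out : String) : Decidable (Spec_odd_row_string size out) := by unfold Spec_odd_row_string; infer_instance

-- ===== CLAIM (what is proved, stated in full; the proofs are below) =====
def Claim_equal_odd_row_string : Prop := ∀ (size : Int), Dom_odd_row_string size → Spec_odd_row_string size (odd_row_string size)

-- ===== LEMMAS AND PROOFS =====

-- the common closed form: alternating characters indexed by parity
def pvAlt (n : Nat) : List Char := (List.range n).map (fun k => if k % 2 = 0 then ' ' else '*')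

lemma flatten_replicate_pair (a b : Char) (m : Nat) :
    (List.replicate m [a, b]).flatten = (List.range (2 * m)).map (fun k => if k % 2 = 0 then a else b) := by
  induction m with
  | zero => simp
  | succ m ih =>
    have h1 : List.replicate (m + 1) [a, b] = List.replicate m [a, b] ++ [[a, b]] := by
      simp [List.replicate_succ' (n := m)]
    have h2 : 2 * (m + 1) = 2 * m + 1 + 1 := by omega
    rw [h1, List.flatten_append, ih, h2, List.range_succ, List.range_succ]
    have e1 : (2 * m) % 2 = 0 := by omega
    have e2 : (2 * m + 1) % 2 = 1 := by omega
    simp [e1, e2]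

lemma b_chars (n : Nat) :
    (PySem.List.slice ((List.replicate (PySem.Int.floordiv ((n : Int) + 1) 2).toNat [' ', '*']).flatten)
      none (some (n : Int))) = pvAlt n := by
  have hfd : PySem.Int.floordiv ((n : Int) + 1) 2 = ((n + 1 : Nat) : Int) / 2 := by
    rw [PySem.Int.floordiv_eq_ediv_of_pos (by omega)]; norm_num
  have htn : (PySem.Int.floordiv ((n : Int) + 1) 2).toNat = (n + 1) / 2 := by
    rw [hfd]
    omega
  rw [PySem.List.slice_to _ (by omega), htn, flatten_replicate_pair]
  have : (n : Int).toNat = n := by omega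
  rw [this, ← List.map_take, List.take_range]
  have : min n (2 * ((n + 1) / 2)) = n := by omega
  rw [this]; rfl

lemma a_chars (n : Nat) :
    ((PySem.List.pyRange 0 (n : Int) 1).foldl
      (fun acc col => acc ++ (if PySem.Int.mod col 2 = 0 then [' '] else ['*'])) []) = pvAlt n := by
  have hf : ∀ (col : Int), (if PySem.Int.mod col 2 = 0 then [' '] else ['*'])
      = [if PySem.Int.mod col 2 = 0 then ' ' else '*'] := by
    intro col; split_ifs <;> rfl
  calc ((PySem.List.pyRange 0 (n : Int) 1).foldl
          (fun acc col => acc ++ (if PySem.Int.mod col 2 = 0 then [' '] else ['*'])) [])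
      = ((PySem.List.pyRange 0 (n : Int) 1).foldl
          (fun acc col => acc ++ [if PySem.Int.mod col 2 = 0 then ' ' else '*']) []) := by
        simp only [hf]
    _ = (PySem.List.pyRange 0 (n : Int) 1).map (fun col => if PySem.Int.mod col 2 = 0 then ' ' else '*') := by
        rw [PySem.List.foldl_append_singleton_eq_map]; simp
    _ = pvAlt n := by
        rw [PySem.List.pyRange_zero_nat]
        unfold pvAlt
        rw [List.map_map]
        apply List.map_congr_left
        intro k _
        simp only [Function.comp]
        have : PySem.Int.mod (k : Int) 2 = ((k % 2 : Nat) : Int) := PySem.Int.mod_natCast k 2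
        rw [this]
        by_cases h : k % 2 = 0
        · simp [h]
        · have h1 : k % 2 = 1 := by omega
          simp [h1]

-- ===== VERDICT (by name: the statement is the Claim_ definition above) =====
theorem odd_row_string_spec : Claim_equal_odd_row_string := by
  intro size _
  unfold Spec_odd_row_string odd_row_string odd_row_string_alt
  rcases (by omega : size ≤ 0 ∨ 0 < size) with h | h
  · -- both empty
    rw [PySem.List.pyRange_one_eq_nil h]
    have hq : PySem.Int.floordiv (size + 1) 2 < 1 :=
      (PySem.Int.floordiv_lt_iff_lt_mul (by omega)).mpr (by omega)
    have : (PySem.Int.floordiv (size + 1) 2).toNat = 0 := by omega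
    rw [this]
    simp [PySem.List.slice]
  · obtain ⟨n, rfl⟩ : ∃ n : Nat, size = (n : Int) := ⟨size.toNat, by omega⟩
    rw [a_chars, b_chars]
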